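-- pv_equiv track=rewrite | github.com/ShiIiA/recommender-system-project | src/utils/utils.py | get_user_level
-- ===== SOURCE A (Python) =====
-- def get_user_level(points: int) -> str:
--     """Calculate user level from points"""
--     levels = [
--         (0, "Novice Cook"),
--         (100, "Home Chef"),
--         (300, "Skilled Cook"),
--         (600, "Master Chef"),
--         (1000, "Culinary Expert")
--     ]
--
--     for threshold, title in reversed(levels):
--         if points >= threshold:
--             return title
--     return "Novice Cook"
-- ===== SOURCE B (Python) =====
-- import bisect
--
-- _THRESHOLDS = [0, 100, 300, 600, 1000]
-- _TITLES = ["Novice Cook", "Home Chef", "Skilled Cook", "Master Chef", "Culinary Expert"]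
--
-- def get_user_level(points: int) -> str:
--     """Calculate user level from points"""
--     i = bisect.bisect_right(_THRESHOLDS, points)
--     return _TITLES[max(i - 1, 0)]
-- ===== Notes on version B (the rewrite author's own statement) =====
-- stated objective: idiomatic
-- what changed: Replaces A's reverse linear scan over (threshold,title) pairs with a precomputed band table and bisect_right binary search for the insertion index, clamped with max(i-1,0) so negative points still map to the lowest title.
import Mathlib
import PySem

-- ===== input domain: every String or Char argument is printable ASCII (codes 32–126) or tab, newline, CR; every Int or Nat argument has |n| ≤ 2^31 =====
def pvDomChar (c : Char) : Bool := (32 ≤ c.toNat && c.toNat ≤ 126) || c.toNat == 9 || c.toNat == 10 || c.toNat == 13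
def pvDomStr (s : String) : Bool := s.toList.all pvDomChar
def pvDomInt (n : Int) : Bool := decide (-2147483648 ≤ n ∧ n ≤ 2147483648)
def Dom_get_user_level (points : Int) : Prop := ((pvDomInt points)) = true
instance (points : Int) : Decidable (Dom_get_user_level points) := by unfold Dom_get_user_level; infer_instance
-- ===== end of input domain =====

-- B replaces A's reverse linear scan with a bisect_right binary search into a band table (idiomatic; same result).

-- ===== PORT A =====
-- A's for-loop over reversed(levels): first pair with points >= threshold wins, else fallback.
def pvScanA (points : Int) : List (Int × String) → String
  | [] => "Novice Cook"
  | (threshold, title) :: rest =>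
      if points ≥ threshold then title else pvScanA points rest

def get_user_level (points : Int) : String :=
  pvScanA points
    ([(0, "Novice Cook"), (100, "Home Chef"), (300, "Skilled Cook"),
      (600, "Master Chef"), (1000, "Culinary Expert")].reverse)

-- ===== PORT B =====
-- bisect.bisect_right(a, x) on the lo..hi range, transcribed step for step
-- (fuel = hi - lo bounds the recursion depth; each step shrinks hi - lo by at least 1).
def pvBisectGo (a : List Int) (x : Int) : Nat → Nat → Nat → Nat
  | 0, lo, _hi => lo
  | fuel + 1, lo, hi =>
      if lo < hi then
        let mid := (lo + hi) / 2
        if x < a.getD mid 0 then pvBisectGo a x fuel lo mid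
        else pvBisectGo a x fuel (mid + 1) hi
      else lo

def pvBisectRight (a : List Int) (x : Int) (lo hi : Nat) : Nat :=
  pvBisectGo a x (hi - lo) lo hi

def get_user_level_alt (points : Int) : String :=
  let thresholds : List Int := [0, 100, 300, 600, 1000]
  let titles := ["Novice Cook", "Home Chef", "Skilled Cook", "Master Chef", "Culinary Expert"]
  let i := pvBisectRight thresholds points 0 thresholds.length
  titles.getD (max (i - 1) 0) "Novice Cook"

-- ===== PRECONDITION & SPEC =====
def Spec_get_user_level (points : Int) (out : String) : Prop := out = get_user_level_alt points
instance (points : Int) (out : String) : Decidable (Spec_get_user_level points out) := by unfold Spec_get_user_level; infer_instance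

-- ===== CLAIM (what is proved, stated in full; the proofs are below) =====
def Claim_equal_get_user_level : Prop := ∀ (points : Int), Dom_get_user_level points → Spec_get_user_level points (get_user_level points)

def pvBand (x : Int) : String :=
  if 1000 ≤ x then "Culinary Expert" else if 600 ≤ x then "Master Chef"
  else if 300 ≤ x then "Skilled Cook" else if 100 ≤ x then "Home Chef" else "Novice Cook"

lemma scan_eval (x : Int) : get_user_level x = pvBand x := by
  show pvScanA x [(1000, "Culinary Expert"), (600, "Master Chef"), (300, "Skilled Cook"),
      (100, "Home Chef"), (0, "Novice Cook")] = pvBand x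
  simp only [pvScanA, pvBand, ge_iff_le]
  by_cases h : (0:Int) ≤ x <;> simp [h]

lemma bisect_eval (x : Int) : pvBisectRight [0, 100, 300, 600, 1000] x 0 5 =
    (if x < 0 then 0 else if x < 100 then 1 else if x < 300 then 2
     else if x < 600 then 3 else if x < 1000 then 4 else 5 : Nat) := by
  unfold pvBisectRight
  rcases lt_or_ge x 0 with h0 | h0
  · simp [pvBisectGo, h0, (by omega : x < 100), (by omega : x < 300)]
  · rcases lt_or_ge x 100 with h1 | h1
    · simp [pvBisectGo, h1, (by omega : x < 300)]
    · rcases lt_or_ge x 300 with h2 | h2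
      · simp [pvBisectGo, h2]
        split_ifs <;> omega
      · rcases lt_or_ge x 600 with h3 | h3
        · simp [pvBisectGo, h3]
          split_ifs <;> omega
        · rcases lt_or_ge x 1000 with h4 | h4
          · simp [pvBisectGo, h4]
            split_ifs <;> omega
          · simp [pvBisectGo]
            split_ifs <;> omega

lemma alt_eval (x : Int) : get_user_level_alt x = pvBand x := by
  unfold get_user_level_alt
  simp only [List.length]
  rw [bisect_eval]
  unfold pvBand
  split_ifs <;> first | rfl | omega

theorem get_user_level_spec : Claim_equal_get_user_level := by
  intro points _
  unfold Spec_get_user_level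
  rw [scan_eval, alt_eval]
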